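-- pv_equiv track=rewrite | github.com/grkygrt1476/AID | scripts/01_intrusion/01_02_roi_label_tool.py | _is_valid_vertices
-- ===== SOURCE A (Python) =====
-- import math
--
-- def _is_valid_vertices(vertices: list[tuple[int, int]], width: int, height: int) -> bool:
--     if len(vertices) < 3:
--         return False
--     if width <= 0 or height <= 0:
--         return False
--     for x, y in vertices:
--         if not math.isfinite(float(x)) or not math.isfinite(float(y)):
--             return False
--         if x < 0 or y < 0 or x >= width or y >= height:
--             return False
--     return True
-- ===== SOURCE B (Python) =====
-- import math
--
-- def _is_valid_vertices(vertices: list[tuple[int, int]], width: int, height: int) -> bool: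
--     if len(vertices) < 3:
--         return False
--     if width <= 0 or height <= 0:
--         return False
--     if any(not math.isfinite(float(x)) or not math.isfinite(float(y)) for x, y in vertices):
--         return False
--     min_x = min(x for x, _ in vertices)
--     max_x = max(x for x, _ in vertices)
--     min_y = min(y for _, y in vertices)
--     max_y = max(y for _, y in vertices)
--     return min_x >= 0 and min_y >= 0 and max_x < width and max_y < height
-- ===== Notes on version B (the rewrite author's own statement) =====
-- stated objective: alternative
-- what changed: Replaces A's single interleaved per-vertex early-return loop by a finiteness pass followed by aggregate min/max reductions over x and y coordinates, comparing only the four extremes against the bounds.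
import Mathlib
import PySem

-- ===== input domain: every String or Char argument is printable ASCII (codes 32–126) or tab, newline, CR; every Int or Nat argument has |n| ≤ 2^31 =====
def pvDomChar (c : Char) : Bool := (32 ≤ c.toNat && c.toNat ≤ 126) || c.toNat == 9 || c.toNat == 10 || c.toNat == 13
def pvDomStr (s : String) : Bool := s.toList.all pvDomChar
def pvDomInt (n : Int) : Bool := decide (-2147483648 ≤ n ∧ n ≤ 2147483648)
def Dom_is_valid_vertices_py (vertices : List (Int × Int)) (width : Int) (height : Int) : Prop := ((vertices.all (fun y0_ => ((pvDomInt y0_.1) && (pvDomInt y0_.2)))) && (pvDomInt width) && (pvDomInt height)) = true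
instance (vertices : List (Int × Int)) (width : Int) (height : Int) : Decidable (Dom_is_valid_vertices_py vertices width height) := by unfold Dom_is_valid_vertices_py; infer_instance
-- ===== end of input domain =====

-- ===== PORT A =====
-- B re-implements A with a finiteness pass plus min/max reductions instead of one interleaved per-vertex loop ("alternative"); return-value equivalence on Dom.
-- math.isfinite(float(n)) is True for every Int in Dom (|n| ≤ 2^31, far below float overflow): ported as the constant-true test.
def pyIsFiniteFloatInt (_n : Int) : Bool := true

-- the for-loop of A, with its early returns, as structural recursion
def isValidLoopA (w h : Int) : List (Int × Int) → Bool
  | [] => true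
  | (x, y) :: rest =>
      if !(pyIsFiniteFloatInt x) || !(pyIsFiniteFloatInt y) then false
      else if x < 0 || y < 0 || x ≥ w || y ≥ h then false
      else isValidLoopA w h rest

def is_valid_vertices_py (vertices : List (Int × Int)) (width : Int) (height : Int) : Bool :=
  if vertices.length < 3 then false
  else if width ≤ 0 || height ≤ 0 then false
  else isValidLoopA width height vertices

-- ===== PORT B =====
def is_valid_vertices_py_alt (vertices : List (Int × Int)) (width : Int) (height : Int) : Bool :=
  if vertices.length < 3 then false
  else if width ≤ 0 || height ≤ 0 then false
  else if vertices.any (fun p => !(pyIsFiniteFloatInt p.1) || !(pyIsFiniteFloatInt p.2)) then false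
  else
    -- min()/max() reductions over the coordinate projections
    match (vertices.map Prod.fst).min?, (vertices.map Prod.fst).max?,
          (vertices.map Prod.snd).min?, (vertices.map Prod.snd).max? with
    | some mnx, some mxx, some mny, some mxy =>
        decide (mnx ≥ 0) && decide (mny ≥ 0) && decide (mxx < width) && decide (mxy < height)
    | _, _, _, _ => false   -- unreachable: len(vertices) ≥ 3 here

-- ===== PRECONDITION & SPEC =====
def Spec_is_valid_vertices_py (vertices : List (Int × Int)) (width : Int) (height : Int) (out : Bool) : Prop := out = is_valid_vertices_py_alt vertices width height
instance (vertices : List (Int × Int)) (width : Int) (height : Int) (out : Bool) : Decidable (Spec_is_valid_vertices_py vertices width height out) := by unfold Spec_is_valid_vertices_py; infer_instance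

-- ===== CLAIM (what is proved, stated in full; the proofs are below) =====
def Claim_equal_is_valid_vertices_py : Prop := ∀ (vertices : List (Int × Int)) (width : Int) (height : Int), Dom_is_valid_vertices_py vertices width height → Spec_is_valid_vertices_py vertices width height (is_valid_vertices_py vertices width height)

-- ===== LEMMAS AND PROOFS =====
theorem loopA_eq_true_iff (w h : Int) (vs : List (Int × Int)) :
    isValidLoopA w h vs = true ↔ ∀ p ∈ vs, 0 ≤ p.1 ∧ 0 ≤ p.2 ∧ p.1 < w ∧ p.2 < h := by
  induction vs with
  | nil => simp [isValidLoopA]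
  | cons q rest ih =>
    obtain ⟨x, y⟩ := q
    simp [isValidLoopA, pyIsFiniteFloatInt, ih]
    intro _
    tauto

theorem min?_nonneg_iff (xs : List Int) (m : Int) (hm : xs.min? = some m) :
    (0 ≤ m) ↔ ∀ x ∈ xs, 0 ≤ x := by
  rw [List.min?_eq_some_iff] at hm
  exact ⟨fun h x hx => le_trans h (hm.2 x hx), fun h => h m hm.1⟩

theorem max?_lt_iff (xs : List Int) (m b : Int) (hm : xs.max? = some m) :
    (m < b) ↔ ∀ x ∈ xs, x < b := by
  rw [List.max?_eq_some_iff] at hm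
  exact ⟨fun h x hx => lt_of_le_of_lt (hm.2 x hx) h, fun h => h m hm.1⟩

-- ===== VERDICT (by name: the statement is the Claim_ definition above) =====
theorem is_valid_vertices_py_spec : Claim_equal_is_valid_vertices_py := by
  intro vs w h _
  unfold Spec_is_valid_vertices_py is_valid_vertices_py is_valid_vertices_py_alt
  by_cases hlen : vs.length < 3
  · simp [hlen]
  · rw [if_neg hlen, if_neg hlen]
    by_cases hwh : w ≤ 0 ∨ h ≤ 0
    · rw [if_pos (by simpa using hwh), if_pos (by simpa using hwh)]
    · rw [if_neg (by simpa using hwh), if_neg (by simpa using hwh)]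
      rw [if_neg (by simp [pyIsFiniteFloatInt])]
      have hne : vs ≠ [] := by intro e; simp [e] at hlen
      have hxne : vs.map Prod.fst ≠ [] := by simpa using hne
      have hyne : vs.map Prod.snd ≠ [] := by simpa using hne
      obtain ⟨mnx, h1⟩ := Option.isSome_iff_exists.mp (by simpa [List.min?_eq_none_iff, Option.isSome_iff_ne_none] using hxne : ((vs.map Prod.fst).min?).isSome)
      obtain ⟨mxx, h2⟩ := Option.isSome_iff_exists.mp (by simpa [List.max?_eq_none_iff, Option.isSome_iff_ne_none] using hxne : ((vs.map Prod.fst).max?).isSome)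
      obtain ⟨mny, h3⟩ := Option.isSome_iff_exists.mp (by simpa [List.min?_eq_none_iff, Option.isSome_iff_ne_none] using hyne : ((vs.map Prod.snd).min?).isSome)
      obtain ⟨mxy, h4⟩ := Option.isSome_iff_exists.mp (by simpa [List.max?_eq_none_iff, Option.isSome_iff_ne_none] using hyne : ((vs.map Prod.snd).max?).isSome)
      rw [h1, h2, h3, h4]
      rw [Bool.eq_iff_iff]
      simp only [loopA_eq_true_iff, Bool.and_eq_true, decide_eq_true_eq, ge_iff_le]
      rw [min?_nonneg_iff _ _ h1, min?_nonneg_iff _ _ h3, max?_lt_iff _ _ _ h2, max?_lt_iff _ _ _ h4]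
      simp only [List.mem_map]
      constructor
      · intro hall
        refine ⟨⟨⟨?_, ?_⟩, ?_⟩, ?_⟩ <;> rintro v ⟨p, hp, rfl⟩
        · exact (hall p hp).1
        · exact (hall p hp).2.1
        · exact (hall p hp).2.2.1
        · exact (hall p hp).2.2.2
      · rintro ⟨⟨⟨a1, a2⟩, a3⟩, a4⟩ p hp
        exact ⟨a1 p.1 ⟨p, hp, rfl⟩, a2 p.2 ⟨p, hp, rfl⟩, a3 p.1 ⟨p, hp, rfl⟩, a4 p.2 ⟨p, hp, rfl⟩⟩
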